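-- pv_equiv track=rewrite | github.com/ryanajocelyn/poc-trial-solution | src/arrays/max_hamming_dist.py | max_hamming_dist
-- ===== SOURCE A (Python) =====
-- def max_hamming_dist(arr):
--     n = len(arr)
--     ar_temp = [0] * 2 * n
--     for i in range(n):
--         ar_temp[i] = ar_temp[i + n] = arr[i]
--
--     max_ham_dist = 0
--     for i in range(n):
--         ind = 0
--         j = i + 1
--         ham_dist = 0
--         while j <= (i + n):
--             if ar_temp[ind] != ar_temp[j]:
--                 ham_dist += 1
--
--             j += 1
--             ind += 1
--
--         max_ham_dist = max(max_ham_dist, ham_dist)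
--         if max_ham_dist == n:
--             break
--
--     return max_ham_dist
-- ===== SOURCE B (Python) =====
-- def max_hamming_dist(arr):
--     n = len(arr)
--     if n <= 1:
--         return 0
--     cnt = [0] * n
--     for p in range(n):
--         for q in range(n):
--             if p != q and arr[p] == arr[q]:
--                 cnt[(q - p) % n] += 1
--     return n - min(cnt[1:])
-- ===== Notes on version B (the rewrite author's own statement) =====
-- stated objective: alternative
-- what changed: Instead of scanning each rotation of the doubled array and keeping a running max of mismatches with an early break, B builds a histogram cnt indexed by modular shift, counting over ordered index pairs (p,q) with arr[p]==arr[q] the matches cnt[(q-p)%n], and returns n - min(cnt[1:]).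
import Mathlib
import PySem

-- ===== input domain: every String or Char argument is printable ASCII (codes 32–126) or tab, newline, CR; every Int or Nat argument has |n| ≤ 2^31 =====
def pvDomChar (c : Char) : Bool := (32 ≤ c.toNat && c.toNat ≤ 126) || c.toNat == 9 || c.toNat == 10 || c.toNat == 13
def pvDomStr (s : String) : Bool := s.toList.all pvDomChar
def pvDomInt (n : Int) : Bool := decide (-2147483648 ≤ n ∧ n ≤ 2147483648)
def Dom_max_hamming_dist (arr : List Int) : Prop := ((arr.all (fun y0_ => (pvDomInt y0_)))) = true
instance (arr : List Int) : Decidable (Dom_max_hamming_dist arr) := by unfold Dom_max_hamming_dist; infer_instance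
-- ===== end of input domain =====

-- B replaces A's rotation-by-rotation mismatch scan (with running max and break) by a
-- histogram over ordered equal-value index pairs keyed by modular shift; same O(n^2) cost.

-- ===== PORT A =====
-- the inner while loop of A (j, ind counters, mismatch accumulator)
def pvHamLoop (t : List Int) (stop j ind : Nat) (ham : Int) : Int :=
  if j ≤ stop then
    pvHamLoop t stop (j+1) (ind+1) (if t.getD ind 0 ≠ t.getD j 0 then ham + 1 else ham)
  else ham
termination_by stop + 1 - j

def max_hamming_dist (arr : List Int) : Int :=
  let n := arr.length
  let ar_temp := (List.range n).foldl
    (fun t i => (t.set i (arr.getD i 0)).set (i + n) (arr.getD i 0))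
    (List.replicate (2 * n) 0)
  -- the break is encoded by the 'if m = n then m' guard: once the running max hits n,
  -- the remaining iterations do nothing
  (List.range n).foldl
    (fun m i => if m = (n : Int) then m else max m (pvHamLoop ar_temp (i + n) (i + 1) 0 0)) 0

-- ===== PORT B =====
def max_hamming_dist_alt (arr : List Int) : Int :=
  let n := arr.length
  if n ≤ 1 then 0
  else
    let cnt := (List.range n).foldl
      (fun c p =>
        (List.range n).foldl
          (fun c q =>
            if p ≠ q ∧ arr.getD p 0 = arr.getD q 0 then
              let d := (PySem.Int.mod ((q : Int) - (p : Int)) (n : Int)).toNat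
              c.set d (c.getD d 0 + 1)
            else c) c)
      (List.replicate n (0 : Int))
    -- min(cnt[1:]); nonempty since n ≥ 2
    (n : Int) - (PySem.List.min? (cnt.drop 1) (fun x => x)).getD 0

-- ===== PRECONDITION & SPEC =====
def Spec_max_hamming_dist (arr : List Int) (out : Int) : Prop := out = max_hamming_dist_alt arr
instance (arr : List Int) (out : Int) : Decidable (Spec_max_hamming_dist arr out) := by unfold Spec_max_hamming_dist; infer_instance

-- ===== CLAIM (what is proved, stated in full; the proofs are below) =====
def Claim_equal_max_hamming_dist : Prop := ∀ (arr : List Int), Dom_max_hamming_dist arr → Spec_max_hamming_dist arr (max_hamming_dist arr)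

-- ===== LEMMAS AND PROOFS =====

-- number of positions k < |arr| where arr matches its rotation by shift d
def pvMC (arr : List Int) (d : Nat) : Nat :=
  ((List.range arr.length).filter
    (fun k => arr.getD k 0 = arr.getD ((k + d) % arr.length) 0)).length


def pvCnt (t : List Int) (ind j : Nat) : Nat → Nat
  | 0 => 0
  | m+1 => (if t.getD ind 0 ≠ t.getD j 0 then 1 else 0) + pvCnt t (ind+1) (j+1) m

def pvMatch (t : List Int) (ind j : Nat) : Nat → Nat
  | 0 => 0
  | m+1 => (if t.getD ind 0 = t.getD j 0 then 1 else 0) + pvMatch t (ind+1) (j+1) m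

theorem pvHamLoop_eq (t : List Int) (stop : Nat) : ∀ (m j ind : Nat) (ham : Int),
    stop + 1 - j = m → pvHamLoop t stop j ind ham = ham + (pvCnt t ind j m : Int) := by
  intro m
  induction m with
  | zero =>
    intro j ind ham hm
    rw [pvHamLoop, if_neg (by omega)]
    simp [pvCnt]
  | succ m ih =>
    intro j ind ham hm
    rw [pvHamLoop, if_pos (by omega)]
    rw [ih (j+1) (ind+1) _ (by omega)]
    rw [pvCnt]
    split_ifs <;> push_cast <;> ring

theorem pvCnt_add_pvMatch (t : List Int) : ∀ (m ind j : Nat),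
    pvCnt t ind j m + pvMatch t ind j m = m := by
  intro m
  induction m with
  | zero => intro ind j; simp [pvCnt, pvMatch]
  | succ m ih =>
    intro ind j
    rw [pvCnt, pvMatch]
    have := ih (ind+1) (j+1)
    split_ifs with h1 h2 <;> omega

theorem pvMatch_filter (t : List Int) : ∀ (m ind j : Nat),
    pvMatch t ind j m
      = ((List.range m).filter (fun k => t.getD (ind + k) 0 = t.getD (j + k) 0)).length := by
  intro m
  induction m with
  | zero => intro ind j; simp [pvMatch]
  | succ m ih =>
    intro ind j
    rw [pvMatch, List.range_succ_eq_map, List.filter_cons]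
    simp only [Nat.add_zero, List.filter_map]
    rw [ih (ind+1) (j+1)]
    have hc : ((List.range m).filter
        ((fun k => decide (t.getD (ind + k) 0 = t.getD (j + k) 0)) ∘ Nat.succ))
        = (List.range m).filter (fun k => decide (t.getD ((ind+1) + k) 0 = t.getD ((j+1) + k) 0)) := by
      apply List.filter_congr
      intro k _
      simp only [Function.comp]
      rw [show ind + Nat.succ k = (ind+1) + k by omega, show j + Nat.succ k = (j+1) + k by omega]
    rw [hc]
    split_ifs with h h2 h3 <;> simp_all [Nat.add_comm]


def pvTemp (arr : List Int) (m : Nat) : List Int :=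
  (List.range m).foldl
    (fun t i => (t.set i (arr.getD i 0)).set (i + arr.length) (arr.getD i 0))
    (List.replicate (2 * arr.length) 0)

theorem pvTemp_len (arr : List Int) (m : Nat) : (pvTemp arr m).length = 2 * arr.length := by
  induction m with
  | zero => simp [pvTemp]
  | succ m ih =>
    rw [pvTemp, List.range_succ, List.foldl_append]
    simp only [List.foldl_cons, List.foldl_nil]
    rw [← pvTemp]
    simp [ih]

theorem pv_getD_set (l : List Int) (i j : Nat) (a : Int) (hi : i < l.length) :
    (l.set i a).getD j 0 = if i = j then a else l.getD j 0 := by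
  simp only [List.getD_eq_getElem?_getD, List.getElem?_set, hi, if_true]
  split_ifs <;> simp

theorem pvTemp_getD (arr : List Int) (m : Nat) (hm : m ≤ arr.length) (k : Nat) :
    (pvTemp arr m).getD k 0
      = if k < m then arr.getD k 0
        else if arr.length ≤ k ∧ k < arr.length + m then arr.getD (k - arr.length) 0 else 0 := by
  induction m with
  | zero => simp [pvTemp, List.getD_eq_getElem?_getD, List.getElem?_replicate]; split_ifs <;> first | rfl | omega
  | succ m ih =>
    have hm' : m ≤ arr.length := by omega
    rw [pvTemp, List.range_succ, List.foldl_append]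
    simp only [List.foldl_cons, List.foldl_nil]
    rw [← pvTemp]
    rw [pv_getD_set _ _ _ _ (by simp [pvTemp_len]; omega),
        pv_getD_set _ _ _ _ (by simp [pvTemp_len]; omega)]
    rw [ih hm']
    split_ifs <;> try omega
    all_goals (congr 1 <;> omega)


def pvStep (arr : List Int) (p : Nat) (c : List Int) (q : Nat) : List Int :=
  if p ≠ q ∧ arr.getD p 0 = arr.getD q 0 then
    let d := (PySem.Int.mod ((q : Int) - (p : Int)) (arr.length : Int)).toNat
    c.set d (c.getD d 0 + 1)
  else c

theorem pvStep_len (arr : List Int) (p : Nat) (c : List Int) (q : Nat) :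
    (pvStep arr p c q).length = c.length := by
  unfold pvStep; split <;> simp

theorem pv_inner_len (arr : List Int) (p : Nat) (qs : List Nat) : ∀ (c : List Int),
    (qs.foldl (pvStep arr p) c).length = c.length := by
  induction qs with
  | nil => intro c; rfl
  | cons q qs ih => intro c; rw [List.foldl_cons, ih, pvStep_len]

theorem pv_inner_getD (arr : List Int) (p : Nat) (hn : 0 < arr.length) (qs : List Nat) :
    ∀ (c : List Int), c.length = arr.length → ∀ d : Nat, d < arr.length →
    (qs.foldl (pvStep arr p) c).getD d 0
      = c.getD d 0 + ((qs.filter (fun q =>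
          decide (p ≠ q ∧ arr.getD p 0 = arr.getD q 0) &&
          decide ((PySem.Int.mod ((q : Int) - (p : Int)) (arr.length : Int)).toNat = d))).length : Int) := by
  induction qs with
  | nil => intro c _ d _; simp
  | cons q qs ih =>
    intro c hc d hd
    rw [List.foldl_cons, List.filter_cons]
    by_cases hP : p ≠ q ∧ arr.getD p 0 = arr.getD q 0
    · have hσ : (PySem.Int.mod ((q : Int) - (p : Int)) (arr.length : Int)).toNat < c.length := by
        have h1 := PySem.Int.mod_lt ((q : Int) - (p : Int)) (b := (arr.length : Int)) (by exact_mod_cast hn)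
        have h2 := PySem.Int.mod_nonneg ((q : Int) - (p : Int)) (b := (arr.length : Int)) (by exact_mod_cast hn)
        omega
      have hstep : pvStep arr p c q
          = c.set ((PySem.Int.mod ((q : Int) - (p : Int)) (arr.length : Int)).toNat)
              (c.getD ((PySem.Int.mod ((q : Int) - (p : Int)) (arr.length : Int)).toNat) 0 + 1) := by
        unfold pvStep; rw [if_pos hP]
      rw [hstep, ih _ (by rw [List.length_set]; exact hc) d hd, pv_getD_set _ _ _ _ hσ]
      by_cases hσd : (PySem.Int.mod ((q : Int) - (p : Int)) (arr.length : Int)).toNat = d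
      · rw [if_pos hσd, hσd, if_pos (by simp only [Bool.and_eq_true, decide_eq_true_eq]; exact ⟨hP, trivial⟩)]
        rw [List.length_cons]; push_cast; ring
      · rw [if_neg hσd, if_neg (by simp only [Bool.and_eq_true, decide_eq_true_eq]; exact fun h => hσd h.2)]
    · have hstep : pvStep arr p c q = c := by unfold pvStep; rw [if_neg hP]
      rw [hstep, ih _ hc d hd, if_neg (by simp only [Bool.and_eq_true, decide_eq_true_eq]; exact fun h => hP h.1)]

theorem pv_shift_iff (q p d n : Nat) (hq : q < n) (hd : d < n) :
    ((((q:Int) - p).emod n).toNat = d) ↔ q = (p + d) % n := by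
  have hn : 0 < n := by omega
  constructor
  · intro h
    change (((q:Int) - p) % n).toNat = d at h
    have hdef := Int.emod_def ((q:Int) - p) n
    have hnn : 0 ≤ ((q:Int) - p) % n := Int.emod_nonneg _ (by positivity)
    have hval : ((q:Int) - p) % n = d := by omega
    have hk : (q:Int) = p + d + n * (((q:Int) - p) / n) := by linarith
    have h2 : ((p:Int) + d) % n = (q:Int) % n := by
      rw [show (p:Int) + d = (q:Int) - n * (((q:Int) - p) / n) by linarith]
      exact Int.sub_mul_emod_self_left _ _ _
    have h3 : (q:Int) % n = q := Int.emod_eq_of_lt (by positivity) (by exact_mod_cast hq)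
    have : ((p + d : Nat) % n : Int) = (q : Int) := by
      push_cast; rw [h2, h3]
    exact_mod_cast this.symm
  · intro h
    have hdm := Nat.div_add_mod (p + d) n
    have hm : ((q:Int) - p) = d - n * ((p + d) / n : Nat) := by
      have : ((p + d : Nat) : Int) = (n : Int) * ((p + d) / n : Nat) + q := by
        exact_mod_cast congrArg (Nat.cast : Nat → Int) (h ▸ hdm).symm
      push_cast at this ⊢
      linarith
    have : ((q:Int) - p) % n = d := by
      rw [hm, Int.sub_mul_emod_self_left]
      exact Int.emod_eq_of_lt (by positivity) (by exact_mod_cast hd)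
    change (((q:Int) - p) % n).toNat = d
    omega

theorem pv_shift_zero (p d n : Nat) (hp : p < n) (hd : d < n) : ((p + d) % n = p) ↔ d = 0 := by
  constructor
  · intro h
    have hdm := Nat.div_add_mod (p + d) n
    rw [h] at hdm
    have hmul : d = n * ((p + d) / n) := by omega
    rcases Nat.eq_zero_or_pos ((p + d) / n) with h0 | h0
    · rw [h0, Nat.mul_zero] at hmul; omega
    · have : n * 1 ≤ n * ((p + d) / n) := Nat.mul_le_mul_left n h0
      omega
  · intro h; subst h; simp [Nat.mod_eq_of_lt hp]

theorem pv_count_eval (arr : List Int) (p d : Nat) (hn : 0 < arr.length)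
    (hp : p < arr.length) (hd : d < arr.length) :
    (((List.range arr.length).filter (fun q =>
        decide (p ≠ q ∧ arr.getD p 0 = arr.getD q 0) &&
        decide ((PySem.Int.mod ((q : Int) - (p : Int)) (arr.length : Int)).toNat = d))).length)
      = if d ≠ 0 ∧ arr.getD p 0 = arr.getD ((p + d) % arr.length) 0 then 1 else 0 := by
  have hnZ : (0 : Int) < (arr.length : Int) := by exact_mod_cast hn
  have hcong : ∀ q ∈ List.range arr.length,
      ((decide (p ≠ q ∧ arr.getD p 0 = arr.getD q 0) &&
        decide ((PySem.Int.mod ((q : Int) - (p : Int)) (arr.length : Int)).toNat = d)))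
      = (decide (d ≠ 0 ∧ arr.getD p 0 = arr.getD ((p + d) % arr.length) 0) &&
         decide (q = (p + d) % arr.length)) := by
    intro q hq
    simp only [List.mem_range] at hq
    rw [← Bool.decide_and, ← Bool.decide_and]
    apply decide_eq_decide.mpr
    constructor
    · rintro ⟨⟨hpq, hmatch⟩, hσ⟩
      rw [PySem.Int.mod_eq_emod_of_pos hnZ] at hσ
      have hq0 : q = (p + d) % arr.length := (pv_shift_iff q p d arr.length hq hd).1 hσ
      have hd0 : d ≠ 0 := by
        intro h0
        exact hpq (by rw [hq0, (pv_shift_zero p d arr.length hp hd).2 h0])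
      exact ⟨⟨hd0, hq0 ▸ hmatch⟩, hq0⟩
    · rintro ⟨⟨hd0, hmatch⟩, hq0⟩
      refine ⟨⟨?_, hq0 ▸ hmatch⟩, ?_⟩
      · intro hpq
        exact hd0 ((pv_shift_zero p d arr.length hp hd).1 (by rw [← hq0, ← hpq]))
      · rw [PySem.Int.mod_eq_emod_of_pos hnZ]
        exact (pv_shift_iff q p d arr.length hq hd).2 hq0
  rw [List.filter_congr hcong]
  by_cases hC : d ≠ 0 ∧ arr.getD p 0 = arr.getD ((p + d) % arr.length) 0
  · rw [if_pos hC]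
    have hfe : (fun q => decide (d ≠ 0 ∧ arr.getD p 0 = arr.getD ((p + d) % arr.length) 0) &&
        decide (q = (p + d) % arr.length)) = (fun q => q == (p + d) % arr.length) := by
      funext q
      rw [decide_eq_true hC, Bool.true_and]
      by_cases h : q = (p + d) % arr.length <;> simp [h]
    rw [hfe, ← List.countP_eq_length_filter]
    have hcr : (List.range arr.length).count ((p + d) % arr.length) = 1 := by
      rw [List.count_range]
      exact if_pos (Nat.mod_lt _ hn)
    exact hcr
  · rw [if_neg hC]
    have hnil : (List.range arr.length).filter (fun q =>
        decide (d ≠ 0 ∧ arr.getD p 0 = arr.getD ((p + d) % arr.length) 0) &&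
        decide (q = (p + d) % arr.length)) = [] := by
      apply List.filter_eq_nil_iff.mpr
      intro q _
      simp only [Bool.and_eq_true, decide_eq_true_eq]
      rintro ⟨hc1, _⟩
      exact hC hc1
    rw [hnil]
    rfl

theorem pv_outer_len (arr : List Int) (ps : List Nat) :
    ((ps.foldl (fun c p => (List.range arr.length).foldl (pvStep arr p) c)
        (List.replicate arr.length (0 : Int)))).length = arr.length := by
  induction ps using List.reverseRecOn with
  | nil => simp
  | append_singleton ps p ih => rw [List.foldl_append, List.foldl_cons, List.foldl_nil, pv_inner_len arr _ _, ih]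

theorem pv_outer_getD (arr : List Int) (hn : 0 < arr.length) (ps : List Nat)
    (hps : ∀ p ∈ ps, p < arr.length) (d : Nat) (hd : d < arr.length) :
    ((ps.foldl (fun c p => (List.range arr.length).foldl (pvStep arr p) c)
        (List.replicate arr.length (0 : Int)))).getD d 0
      = ((ps.filter (fun p =>
          decide (d ≠ 0 ∧ arr.getD p 0 = arr.getD ((p + d) % arr.length) 0))).length : Int) := by
  induction ps using List.reverseRecOn with
  | nil =>
    simp only [List.foldl_nil, List.filter_nil, List.length_nil, List.getD_eq_getElem?_getD,
      List.getElem?_replicate]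
    split_ifs <;> rfl
  | append_singleton ps p ih =>
    have hp : p < arr.length := hps p (by simp)
    have hps' : ∀ x ∈ ps, x < arr.length := fun x hx => hps x (by simp [hx])
    rw [List.foldl_append, List.foldl_cons, List.foldl_nil, List.filter_append]
    rw [pv_inner_getD arr p hn _ _ (pv_outer_len arr ps) d hd, ih hps']
    rw [pv_count_eval arr p d hn hp hd]
    by_cases hC : d ≠ 0 ∧ arr.getD p 0 = arr.getD ((p + d) % arr.length) 0
    · rw [if_pos hC, List.filter_singleton, decide_eq_true hC]
      push_cast
      simp
    · rw [if_neg hC, List.filter_singleton, decide_eq_false hC]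
      push_cast
      simp

theorem pvMC_le (arr : List Int) (d : Nat) : pvMC arr d ≤ arr.length := by
  unfold pvMC
  exact le_trans (List.length_filter_le _ _) (by simp)

theorem pvMC_len (arr : List Int) : pvMC arr arr.length = arr.length := by
  unfold pvMC
  rw [List.filter_eq_self.2]
  · simp
  · intro k hk
    simp only [List.mem_range] at hk
    simp [Nat.add_mod_right, Nat.mod_eq_of_lt hk]

theorem pv_ham_val (arr : List Int) (i : Nat) (hi : i < arr.length) :
    pvHamLoop (pvTemp arr arr.length) (i + arr.length) (i + 1) 0 0
      = (arr.length : Int) - (pvMC arr (i+1) : Int) := by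
  rw [pvHamLoop_eq (pvTemp arr arr.length) (i + arr.length) arr.length (i+1) 0 0 (by omega)]
  have hsum := pvCnt_add_pvMatch (pvTemp arr arr.length) arr.length 0 (i+1)
  have hmatch : pvMatch (pvTemp arr arr.length) 0 (i+1) arr.length = pvMC arr (i+1) := by
    rw [pvMatch_filter]
    unfold pvMC
    apply congrArg List.length
    apply List.filter_congr
    intro k hk
    simp only [List.mem_range] at hk
    rw [pvTemp_getD arr arr.length le_rfl, pvTemp_getD arr arr.length le_rfl]
    rw [if_pos (show 0 + k < arr.length by omega), Nat.zero_add]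
    by_cases hlt : (i + 1) + k < arr.length
    · rw [if_pos hlt]
      rw [show (k + (i + 1)) % arr.length = (i + 1) + k from by
        rw [Nat.mod_eq_of_lt (by omega)]; omega]
    · rw [if_neg hlt, if_pos (by omega)]
      rw [show (k + (i + 1)) % arr.length = (i + 1) + k - arr.length from by
        rw [Nat.mod_eq_sub_mod (by omega), Nat.mod_eq_of_lt (by omega)]; omega]
  rw [hmatch] at hsum
  have hle := pvMC_le arr (i+1)
  omega

theorem pv_A_eq (arr : List Int) :
    max_hamming_dist arr
      = ((List.range arr.length).map
          (fun i => (arr.length : Int) - (pvMC arr (i+1) : Int))).foldl max 0 := by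
  have h1 : max_hamming_dist arr
      = (List.range arr.length).foldl
          (fun m i => if m = (arr.length : Int) then m
            else max m (pvHamLoop (pvTemp arr arr.length) (i + arr.length) (i + 1) 0 0)) 0 := rfl
  rw [h1, List.foldl_map]
  apply PySem.List.foldl_congr_mem
  intro m i hi
  simp only [List.mem_range] at hi
  rw [pv_ham_val arr i hi]
  by_cases hm : m = (arr.length : Int)
  · rw [if_pos hm, hm, max_eq_left (by have := pvMC_le arr (i+1); omega)]
  · rw [if_neg hm]

theorem pv_foldl_min_le (xs : List Int) : ∀ b : Int, xs.foldl min b ≤ b := by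
  induction xs with
  | nil => intro b; simp
  | cons x t ih =>
    intro b
    rw [List.foldl_cons]
    exact le_trans (ih (min b x)) (min_le_left _ _)

theorem pv_foldl_max_sub (c : Int) (xs : List Int) : ∀ b : Int,
    ((xs.map (fun x => c - x)).foldl max (c - b)) = c - xs.foldl min b := by
  induction xs with
  | nil => intro b; simp
  | cons x t ih =>
    intro b
    rw [List.map_cons, List.foldl_cons, List.foldl_cons,
        show max (c - b) (c - x) = c - min b x from by rcases le_total b x with h | h <;> simp [h] <;> omega]
    exact ih (min b x)

theorem pv_arith (g : Nat → Nat) (n : Nat) (hn : 2 ≤ n)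
    (hle : ∀ j, g j ≤ n) (hlast : g n = n) :
    ((List.range n).map (fun i => (n : Int) - (g (i+1) : Int))).foldl max 0
      = (n : Int) - (PySem.List.min? ((List.range (n-1)).map (fun j => (g (j+1) : Int))) (fun x => x)).getD 0 := by
  obtain ⟨m, rfl⟩ : ∃ m, n = m + 2 := ⟨n - 2, by omega⟩
  have hsplit : List.range (m + 2) = List.range (m + 1) ++ [m + 1] := List.range_succ
  rw [hsplit, List.map_append, List.foldl_append]
  simp only [List.map_cons, List.map_nil, List.foldl_cons, List.foldl_nil]
  rw [show ((m + 2 : Nat) : Int) - (g (m + 1 + 1) : Int) = 0 from by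
    rw [show m + 1 + 1 = m + 2 from rfl, hlast]; ring]
  have hmm : (List.range (m+1)).map (fun i => ((m+2:Nat) : Int) - (g (i+1) : Int))
      = ((List.range (m+1)).map (fun i => (g (i+1) : Int))).map (fun x => ((m+2:Nat) : Int) - x) := by
    rw [List.map_map]
    rfl
  rw [hmm]
  set X := (List.range (m+1)).map (fun i => (g (i+1) : Int)) with hXdef
  have hfold : (X.map (fun x => ((m+2:Nat) : Int) - x)).foldl max 0
      = ((m+2:Nat) : Int) - X.foldl min ((m+2:Nat) : Int) := by
    have := pv_foldl_max_sub ((m+2:Nat) : Int) X ((m+2:Nat) : Int)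
    simpa using this
  rw [hfold]
  have hX : X = ((g 1 : Nat) : Int) :: (List.range m).map (fun i => (g (i+2) : Int)) := by
    rw [hXdef, List.range_succ_eq_map, List.map_cons, List.map_map]
    rfl
  have hmp1 : (m + 2 : Nat) - 1 = m + 1 := by omega
  rw [hmp1, ← hXdef, hX, PySem.List.min?_id_cons]
  simp only [Option.getD_some]
  have hx0 : ((g 1 : Nat) : Int) ≤ ((m+2:Nat) : Int) := by exact_mod_cast hle 1
  rw [List.foldl_cons, show min ((m+2:Nat) : Int) ((g 1 : Nat) : Int) = ((g 1 : Nat) : Int) from min_eq_right hx0]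
  have hv := pv_foldl_min_le ((List.range m).map (fun i => (g (i+2) : Int))) ((g 1 : Nat) : Int)
  rw [max_eq_left (by omega)]

theorem pv_alt_eq (arr : List Int) :
    max_hamming_dist_alt arr
      = if arr.length ≤ 1 then 0
        else (arr.length : Int) -
          (PySem.List.min? ((((List.range arr.length).foldl
              (fun c p => (List.range arr.length).foldl (pvStep arr p) c)
              (List.replicate arr.length (0 : Int)))).drop 1) (fun x => x)).getD 0 := rfl

theorem pv_B_eq (arr : List Int) (hn : 2 ≤ arr.length) :
    max_hamming_dist_alt arr
      = (arr.length : Int) -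
        (PySem.List.min? ((List.range (arr.length - 1)).map (fun j => (pvMC arr (j+1) : Int))) (fun x => x)).getD 0 := by
  rw [pv_alt_eq, if_neg (by omega)]
  have hn0 : 0 < arr.length := by omega
  have hdrop : (((List.range arr.length).foldl
      (fun c p => (List.range arr.length).foldl (pvStep arr p) c)
      (List.replicate arr.length (0 : Int)))).drop 1
      = (List.range (arr.length - 1)).map (fun j => (pvMC arr (j+1) : Int)) := by
    apply List.ext_getElem
    · simp [pv_outer_len]
    · intro j h1 h2
      rw [List.getElem_drop]
      have hj : 1 + j < arr.length := by
        simp [pv_outer_len] at h1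
        omega
      have hget := pv_outer_getD arr hn0 (List.range arr.length) (by simp) (1+j) hj
      have hgd : (((List.range arr.length).foldl
          (fun c p => (List.range arr.length).foldl (pvStep arr p) c)
          (List.replicate arr.length (0 : Int)))).getD (1+j) 0
          = (((List.range arr.length).foldl
          (fun c p => (List.range arr.length).foldl (pvStep arr p) c)
          (List.replicate arr.length (0 : Int))))[1+j]'(by rw [pv_outer_len]; omega) := by
        rw [List.getD_eq_getElem?_getD, List.getElem?_eq_getElem (by rw [pv_outer_len]; omega)]
        rfl
      rw [← hgd, hget]
      have hfc : (List.range arr.length).filter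
          (fun p => decide ((1+j) ≠ 0 ∧ arr.getD p 0 = arr.getD ((p + (1+j)) % arr.length) 0))
          = (List.range arr.length).filter
            (fun p => decide (arr.getD p 0 = arr.getD ((p + (1+j)) % arr.length) 0)) := by
        apply List.filter_congr
        intro p _
        simp
      rw [hfc]
      rw [List.getElem_map, List.getElem_range]
      have : pvMC arr (j+1)
          = ((List.range arr.length).filter
              (fun p => decide (arr.getD p 0 = arr.getD ((p + (1+j)) % arr.length) 0))).length := by
        unfold pvMC
        rw [show 1 + j = j + 1 from by omega]
      rw [this]
  rw [hdrop]

-- main equivalence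
theorem pv_main (arr : List Int) : max_hamming_dist arr = max_hamming_dist_alt arr := by
  rcases Nat.lt_or_ge arr.length 2 with hn | hn
  · rw [pv_alt_eq, if_pos (by omega), pv_A_eq]
    interval_cases h : arr.length
    · simp
    · rw [show List.range 1 = [0] from rfl]
      simp only [List.map_cons, List.map_nil, List.foldl_cons, List.foldl_nil]
      rw [show (0:Nat) + 1 = 1 from rfl, show (1:Nat) = arr.length from by omega, pvMC_len]
      simp
  · rw [pv_A_eq, pv_B_eq arr hn]
    exact pv_arith (pvMC arr) arr.length hn (pvMC_le arr) (pvMC_len arr)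

-- ===== VERDICT (by name: the statement is the Claim_ definition above) =====
theorem max_hamming_dist_spec : Claim_equal_max_hamming_dist := by
  intro arr _
  unfold Spec_max_hamming_dist
  exact pv_main arr
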